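-- pv_equiv track=rewrite | github.com/mazi76erX2/vault | vault/app/utils.py | get_info_mrkdwn
-- ===== SOURCE A (Python) =====
-- def get_info_mrkdwn(text_list):
--     # Initialize an empty list to store formatted markdown content
--     markdown_content = []
--
--     # Initialize variables to track if we're in an answer block
--     in_answer = False
--     current_answer = []
--
--     # Iterate over the text list to identify Q/A pairs
--     for line in text_list:
--         stripped_line = line.strip()
--         if stripped_line.startswith("Q:") or stripped_line.startswith("Question:"):
--             # If we encounter a new question, finalize the current answer (if any)
--             if in_answer:
--                 markdown_content.append(" ".join(current_answer))
--
--                 in_answer = False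
--                 current_answer = []
--
--             # Add the question in bold
--             markdown_content.append(f"**{stripped_line}**")
--
--         elif stripped_line.startswith("A:") or stripped_line.startswith("Answer:"):
--             # If it's the start of an answer, set the in_answer flag
--             if in_answer:
--                 # Finalize the previous answer before starting a new one
--                 markdown_content.append(" ".join(current_answer))
--
--             in_answer = True
--             current_answer = [stripped_line]
--
--         elif in_answer:
--             # If we're in an answer block, append the current line to the answer
--             current_answer.append(stripped_line)
--
--     # Finalize any remaining answer
--     if in_answer:
--         markdown_content.append(" ".join(current_answer))
--         markdown_content.append("---")
--
--     # Join the content with newlines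
--     return "\n\n".join(markdown_content)
-- ===== SOURCE B (Python) =====
-- def get_info_mrkdwn(text_list):
--     # Pass 1: parse lines into block records ('q', question) / ('a', [answer lines]).
--     blocks = []
--     for line in text_list:
--         s = line.strip()
--         if s.startswith("Q:") or s.startswith("Question:"):
--             blocks.append(("q", s))
--         elif s.startswith("A:") or s.startswith("Answer:"):
--             blocks.append(("a", [s]))
--         elif blocks and blocks[-1][0] == "a":
--             blocks[-1][1].append(s)
--     # Pass 2: render blocks to markdown elements.
--     content = [f"**{payload}**" if kind == "q" else " ".join(payload)
--                for kind, payload in blocks]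
--     if blocks and blocks[-1][0] == "a":
--         content.append("---")
--     return "\n\n".join(content)
-- ===== Notes on version B (the rewrite author's own statement) =====
-- stated objective: alternative
-- what changed: B separates parsing from rendering: a first pass builds a list of question/answer block records (appending continuation lines to the last open answer block), a second pass maps blocks to markdown strings and appends the trailing '---' when the final block is an answer, instead of A's single stateful loop with in_answer/current_answer flags and inline string emission.
import Mathlib
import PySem

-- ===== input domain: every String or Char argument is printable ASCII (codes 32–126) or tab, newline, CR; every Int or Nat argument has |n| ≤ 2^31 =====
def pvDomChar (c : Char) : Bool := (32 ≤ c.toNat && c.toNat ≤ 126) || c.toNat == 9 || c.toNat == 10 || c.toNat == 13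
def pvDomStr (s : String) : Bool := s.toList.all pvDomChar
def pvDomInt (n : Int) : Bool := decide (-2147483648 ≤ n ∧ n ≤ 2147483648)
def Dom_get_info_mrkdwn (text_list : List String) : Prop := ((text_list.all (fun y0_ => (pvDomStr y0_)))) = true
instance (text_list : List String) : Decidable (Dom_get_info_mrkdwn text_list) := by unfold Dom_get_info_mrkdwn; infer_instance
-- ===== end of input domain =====

-- B parses into block records first and renders them in a second pass, instead of A's single
-- stateful loop; same result, alternative decomposition.

-- ===== PORT A =====
-- loop body of A's for-loop over (markdown_content, in_answer, current_answer)
def pvStepA (st : List String × Bool × List String) (line : String) : List String × Bool × List String :=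
  if PySem.Str.startswith (PySem.Str.strip line) "Q:" || PySem.Str.startswith (PySem.Str.strip line) "Question:" then
    ((if st.2.1 then st.1 ++ [PySem.Str.join " " st.2.2] else st.1) ++ ["**" ++ PySem.Str.strip line ++ "**"], false, [])
  else if PySem.Str.startswith (PySem.Str.strip line) "A:" || PySem.Str.startswith (PySem.Str.strip line) "Answer:" then
    ((if st.2.1 then st.1 ++ [PySem.Str.join " " st.2.2] else st.1), true, [PySem.Str.strip line])
  else if st.2.1 then (st.1, st.2.1, st.2.2 ++ [PySem.Str.strip line])
  else st

def get_info_mrkdwn (text_list : List String) : String :=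
  let st := text_list.foldl pvStepA ([], false, [])
  let mc := if st.2.1 then st.1 ++ [PySem.Str.join " " st.2.2, "---"] else st.1
  PySem.Str.join "\n\n" mc

-- ===== PORT B =====
inductive PvBlock where
  | q : String → PvBlock
  | ans : List String → PvBlock
deriving DecidableEq, Repr

-- loop body of B's first (parsing) pass
def pvStepB (blocks : List PvBlock) (line : String) : List PvBlock :=
  if PySem.Str.startswith (PySem.Str.strip line) "Q:" || PySem.Str.startswith (PySem.Str.strip line) "Question:" then
    blocks ++ [PvBlock.q (PySem.Str.strip line)]
  else if PySem.Str.startswith (PySem.Str.strip line) "A:" || PySem.Str.startswith (PySem.Str.strip line) "Answer:" then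
    blocks ++ [PvBlock.ans [PySem.Str.strip line]]
  else
    match blocks.getLast? with
    | some (PvBlock.ans ls) => blocks.dropLast ++ [PvBlock.ans (ls ++ [PySem.Str.strip line])]
    | _ => blocks

-- B's second (rendering) pass
def pvRender : PvBlock → String
  | PvBlock.q s => "**" ++ s ++ "**"
  | PvBlock.ans ls => PySem.Str.join " " ls

def get_info_mrkdwn_alt (text_list : List String) : String :=
  let blocks := text_list.foldl pvStepB []
  let content := blocks.map pvRender
  let content :=
    match blocks.getLast? with
    | some (PvBlock.ans _) => content ++ ["---"]
    | _ => content
  PySem.Str.join "\n\n" content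

-- ===== PRECONDITION & SPEC =====
def Spec_get_info_mrkdwn (text_list : List String) (out : String) : Prop := out = get_info_mrkdwn_alt text_list
instance (text_list : List String) (out : String) : Decidable (Spec_get_info_mrkdwn text_list out) := by unfold Spec_get_info_mrkdwn; infer_instance

-- ===== CLAIM (what is proved, stated in full; the proofs are below) =====
def Claim_equal_get_info_mrkdwn : Prop := ∀ (text_list : List String), Dom_get_info_mrkdwn text_list → Spec_get_info_mrkdwn text_list (get_info_mrkdwn text_list)

-- ===== LEMMAS AND PROOFS =====

-- abstraction: A's loop state as a function of B's block list
def pvToA (bs : List PvBlock) : List String × Bool × List String :=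
  match bs.getLast? with
  | some (PvBlock.ans ls) => (bs.dropLast.map pvRender, true, ls)
  | _ => (bs.map pvRender, false, [])

theorem pv_decomp (bs : List PvBlock) (ls : List String)
    (h : bs.getLast? = some (PvBlock.ans ls)) :
    bs = bs.dropLast ++ [PvBlock.ans ls] := by
  conv_lhs => rw [← List.dropLast_append_getLast? _ h]

theorem pvToA_concat_q (bs : List PvBlock) (s : String) :
    pvToA (bs ++ [PvBlock.q s]) = (bs.map pvRender ++ ["**" ++ s ++ "**"], false, []) := by
  unfold pvToA
  simp [pvRender]

theorem pvToA_concat_ans (bs : List PvBlock) (ls : List String) :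
    pvToA (bs ++ [PvBlock.ans ls]) = (bs.map pvRender, true, ls) := by
  unfold pvToA
  simp

theorem pv_step (bs : List PvBlock) (line : String) :
    pvStepA (pvToA bs) line = pvToA (pvStepB bs line) := by
  unfold pvStepA pvStepB
  rcases hL : bs.getLast? with _ | b
  · obtain rfl := List.getLast?_eq_none_iff.mp hL
    split_ifs <;> simp_all [pvToA, pvRender]
  · rcases b with s | ls
    · obtain ⟨bs', rfl⟩ : ∃ bs', bs = bs' ++ [PvBlock.q s] :=
        ⟨bs.dropLast, by conv_lhs => rw [← List.dropLast_append_getLast? _ hL]⟩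
      split_ifs <;>
        (simp only [pvToA_concat_q, pvToA_concat_ans] at * <;>
          simp_all [pvRender])
    · obtain ⟨bs', rfl⟩ : ∃ bs', bs = bs' ++ [PvBlock.ans ls] :=
        ⟨bs.dropLast, pv_decomp bs ls hL⟩
      split_ifs <;>
        (simp only [pvToA_concat_q, pvToA_concat_ans] at *;
          simp_all [pvRender])

theorem pv_fold (l : List String) (bs : List PvBlock) :
    l.foldl pvStepA (pvToA bs) = pvToA (l.foldl pvStepB bs) := by
  induction l generalizing bs with
  | nil => rfl
  | cons x xs ih => simp only [List.foldl_cons, pv_step, ih]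

-- ===== VERDICT (by name: the statement is the Claim_ definition above) =====
theorem get_info_mrkdwn_spec : Claim_equal_get_info_mrkdwn := by
  intro l _
  unfold Spec_get_info_mrkdwn get_info_mrkdwn get_info_mrkdwn_alt
  have h0 : (([], false, []) : List String × Bool × List String) = pvToA [] := rfl
  rw [h0, pv_fold]
  set bs := l.foldl pvStepB [] with hbs
  unfold pvToA
  rcases hL : bs.getLast? with _ | b
  · simp [hL]
  · rcases b with s | ls
    · simp [hL]
    · rw [pv_decomp bs ls hL]
      simp [pvRender, PySem.Str.join]
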